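-- pv_equiv track=rewrite | github.com/KotlinIsland/basedmypy | mypy/stubdoc.py | find_unique_signatures
-- ===== SOURCE A (Python) =====
-- from typing import Any, Final, MutableMapping, MutableSequence, NamedTuple, Sequence, Tuple
-- from typing_extensions import TypeAlias as _TypeAlias
--
-- Sig: _TypeAlias = Tuple[str, str]
--
-- def find_unique_signatures(sigs: Sequence[Sig]) -> list[Sig]:
--     """Remove names with duplicate found signatures."""
--     sig_map: MutableMapping[str, list[str]] = {}
--     for name, sig in sigs:
--         sig_map.setdefault(name, []).append(sig)
--
--     result = []
--     for name, name_sigs in sig_map.items():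
--         if len(set(name_sigs)) == 1:
--             result.append((name, name_sigs[0]))
--     return sorted(result)
-- ===== SOURCE B (Python) =====
-- def find_unique_signatures(sigs):
--     """Remove names with duplicate found signatures."""
--     ordered = sorted(sigs, key=lambda p: p[0])
--     result = []
--     i = 0
--     while i < len(ordered):
--         name, first = ordered[i]
--         j = i + 1
--         unique = True
--         while j < len(ordered) and ordered[j][0] == name:
--             if ordered[j][1] != first:
--                 unique = False
--             j += 1
--         if unique:
--             result.append((name, first))
--         i = j
--     return result
-- ===== Notes on version B (the rewrite author's own statement) =====
-- stated objective: alternative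
-- what changed: Replaced the dict-of-signature-lists + per-name set + final sort with a single stable sort by name followed by one linear scan over the runs of equal names, emitting each uniform run's first signature; the output is already in sorted order so no final sort is needed.
import Mathlib
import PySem

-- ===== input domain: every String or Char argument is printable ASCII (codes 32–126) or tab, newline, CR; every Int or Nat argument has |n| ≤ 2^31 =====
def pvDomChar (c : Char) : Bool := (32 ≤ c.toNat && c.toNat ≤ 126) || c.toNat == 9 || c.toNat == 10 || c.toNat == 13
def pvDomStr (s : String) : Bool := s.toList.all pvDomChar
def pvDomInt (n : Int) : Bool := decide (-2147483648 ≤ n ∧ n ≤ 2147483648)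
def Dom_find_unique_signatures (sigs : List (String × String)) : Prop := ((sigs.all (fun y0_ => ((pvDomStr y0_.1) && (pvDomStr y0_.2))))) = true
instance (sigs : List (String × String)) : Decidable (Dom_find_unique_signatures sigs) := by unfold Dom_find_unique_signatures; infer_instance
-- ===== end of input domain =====

-- B replaces A's dict-of-signature-lists + per-name set check + final sort by ONE stable sort by
-- name followed by a linear scan over the runs of equal names (objective: alternative).

-- ===== PORT A =====
def find_unique_signatures (sigs : List (String × String)) : List (String × String) :=
  let sig_map : PySem.Dict String (List String) :=
    sigs.foldl (fun d p => d.modify p.1 [] (fun l => l ++ [p.2])) PySem.Dict.empty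
  let result : List (String × String) :=
    sig_map.items.foldl
      (fun acc p =>
        if (PySem.Set.ofList p.2).length == 1 then
          acc ++ [(p.1, PySem.List.pyGetD p.2 0 "")]
        else acc) []
  PySem.List.sorted2 result (fun p => p.1) (fun p => p.2)

-- ===== PORT B =====
-- inner while loop of Source B: scan the run of pairs whose name equals n, conjoining (sig == first),
-- returning (unique flag of the run, rest of the list after the run)
def pvScanRun (n first : String) : List (String × String) → Bool × List (String × String)
  | [] => (true, [])
  | p :: t =>
    if p.1 == n then
      let r := pvScanRun n first t
      ((p.2 == first) && r.1, r.2)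
    else (true, p :: t)

-- needed by pvGroups' termination proof (the remainder is no longer than the scanned list)
theorem pvScanRun_snd_length_le (n first : String) :
    ∀ t : List (String × String), (pvScanRun n first t).2.length ≤ t.length := by
  intro t
  induction t with
  | nil => simp [pvScanRun]
  | cons p t ih =>
    by_cases h : p.1 == n
    · simp only [pvScanRun, h]
      exact Nat.le_succ_of_le ih
    · simp [pvScanRun, h]

-- outer while loop of Source B: one step per run of equal names
def pvGroups : List (String × String) → List (String × String)
  | [] => []
  | p :: t =>
    let r := pvScanRun p.1 p.2 t
    (if r.1 then [(p.1, p.2)] else []) ++ pvGroups r.2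
  termination_by s => s.length
  decreasing_by simpa using Nat.lt_succ_of_le (pvScanRun_snd_length_le p.1 p.2 t)

def find_unique_signatures_alt (sigs : List (String × String)) : List (String × String) :=
  pvGroups (PySem.List.sorted sigs (fun p => p.1))

-- ===== PRECONDITION & SPEC =====
def Spec_find_unique_signatures (sigs : List (String × String)) (out : List (String × String)) : Prop := out = find_unique_signatures_alt sigs
instance (sigs : List (String × String)) (out : List (String × String)) : Decidable (Spec_find_unique_signatures sigs out) := by unfold Spec_find_unique_signatures; infer_instance

-- ===== CLAIM (what is proved, stated in full; the proofs are below) =====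
def Claim_equal_find_unique_signatures : Prop := ∀ (sigs : List (String × String)), Dom_find_unique_signatures sigs → Spec_find_unique_signatures sigs (find_unique_signatures sigs)

-- ===== LEMMAS AND PROOFS =====

-- signatures recorded for a name, in input order
def pvSigsOf (sigs : List (String × String)) (n : String) : List String :=
  (sigs.filter (fun p => p.1 == n)).map (fun p => p.2)

-- "all signatures of this run agree", as B's run scan tests it
def pvUniform : List String → Bool
  | [] => false
  | v :: g => g.all (fun s => s == v)

-- the normal form both ports are reduced to: names from `keyNames`, data from `sigs`
def pvNF (keyNames : List String) (sigs : List (String × String)) : List (String × String) :=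
  ((PySem.Set.ofList keyNames).filter (fun n => pvUniform (pvSigsOf sigs n))).map
    (fun n => (n, (pvSigsOf sigs n).headD ""))

theorem pv_insertBy_congr {α : Type} (b1 b2 : α → α → Bool) (x : α) :
    ∀ acc : List α, (∀ y ∈ acc, b1 x y = b2 x y) → PySem.List.insertBy b1 x acc = PySem.List.insertBy b2 x acc := by
  intro acc
  induction acc with
  | nil => intro _; rfl
  | cons y ys ih =>
    intro h
    simp only [PySem.List.insertBy]
    rw [h y (by simp)]
    by_cases hb : b2 x y
    · rw [if_pos hb, if_pos hb]
    · rw [if_neg hb, if_neg hb, ih (fun z hz => h z (by simp [hz]))]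

theorem pv_insertBy_perm {α : Type} (b : α → α → Bool) (x : α) (l : List α) :
    (PySem.List.insertBy b x l).Perm (x :: l) := by
  induction l with
  | nil => simp [PySem.List.insertBy]
  | cons y ys ih =>
    simp only [PySem.List.insertBy]
    by_cases hb : b x y
    · rw [if_pos hb]
    · rw [if_neg hb]
      exact (ih.cons y).trans (List.Perm.swap x y ys)

theorem pv_ofList_sublist {α : Type} [BEq α] (l : List α) : (PySem.Set.ofList l).Sublist l := by
  suffices h : ∀ (l : List α) (s : PySem.Set α), ∃ t, l.foldl PySem.Set.add s = s ++ t ∧ t.Sublist l by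
    obtain ⟨t, ht, hs⟩ := h l PySem.Set.empty
    rw [show PySem.Set.ofList l = l.foldl PySem.Set.add PySem.Set.empty from rfl, ht]
    simpa [PySem.Set.empty] using hs
  intro l
  induction l with
  | nil => intro s; exact ⟨[], by simp, by simp⟩
  | cons x xs ih =>
    intro s
    simp only [List.foldl_cons]
    by_cases hc : PySem.Set.contains s x
    · obtain ⟨t, ht, hs⟩ := ih s
      exact ⟨t, by rwa [show PySem.Set.add s x = s from by simp only [PySem.Set.add, PySem.Set.contains] at hc ⊢; simp [hc]], hs.cons x⟩
    · obtain ⟨t, ht, hs⟩ := ih (s ++ [x])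
      refine ⟨x :: t, ?_, hs.cons₂ x⟩
      rw [show PySem.Set.add s x = s ++ [x] from by simp only [PySem.Set.add, PySem.Set.contains] at hc ⊢; simp [hc], ht, List.append_assoc]
      rfl

theorem pvScanRun_eq (n first : String) (t : List (String × String)) :
    pvScanRun n first t =
      ((t.takeWhile (fun p => p.1 == n)).all (fun p => p.2 == first),
       t.dropWhile (fun p => p.1 == n)) := by
  induction t with
  | nil => rfl
  | cons p t ih =>
    by_cases h : p.1 == n
    · simp [pvScanRun, h, ih]
    · simp [pvScanRun, h]

theorem pv_ofList_const {α : Type} [BEq α] [LawfulBEq α] (x : α) :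
    ∀ l : List α, (∀ m ∈ l, m = x) → l.foldl PySem.Set.add [x] = [x] := by
  intro l
  induction l with
  | nil => intro _; rfl
  | cons y ys ih =>
    intro h
    have hy : y = x := h y (by simp)
    have : PySem.Set.add [x] y = [x] := by
      simp [PySem.Set.add, PySem.Set.contains, hy]
    simp only [List.foldl_cons, this]
    exact ih (fun m hm => h m (by simp [hm]))

theorem pv_ofList_run (x : String) (l₁ l₂ : List String)
    (h1 : ∀ m ∈ l₁, m = x) (h2 : x ∉ l₂) :
    PySem.Set.ofList (x :: (l₁ ++ l₂)) = x :: PySem.Set.ofList l₂ := by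
  have e1 : PySem.Set.ofList (x :: (l₁ ++ l₂)) = (l₁ ++ l₂).foldl PySem.Set.add [x] := by
    rfl
  rw [e1, List.foldl_append, pv_ofList_const x l₁ h1]
  have e2 : l₂.foldl PySem.Set.add [x] = PySem.Set.update [x] l₂ := rfl
  rw [e2, PySem.Set.update_eq_append_filter]
  have : (PySem.Set.ofList l₂).filter (fun y => !(PySem.Set.contains [x] y)) = PySem.Set.ofList l₂ := by
    apply List.filter_eq_self.mpr
    intro a ha
    have : a ∈ l₂ := (PySem.Set.mem_ofList l₂ a).mp ha
    simp [PySem.Set.contains]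
    intro hax
    exact absurd (hax ▸ this) h2
  rw [this]
  rfl

theorem pv_ofList_pairwise_lt (l : List String) (h : l.Pairwise (· ≤ ·)) :
    (PySem.Set.ofList l).Pairwise (· < ·) := by
  have hsub := pv_ofList_sublist l
  have hle : (PySem.Set.ofList l).Pairwise (· ≤ ·) := h.sublist hsub
  have hne : (PySem.Set.ofList l).Pairwise (· ≠ ·) := PySem.Set.nodup_ofList l
  exact (hle.and hne).imp (fun h => lt_of_le_of_ne h.1 h.2)

theorem pv_guard_eq (l : List String) :
    ((PySem.Set.ofList l).length == 1) = pvUniform l := by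
  cases l with
  | nil => rfl
  | cons v g =>
    cases hall : g.all (fun s => s == v) with
    | true =>
      have h1 : ∀ m ∈ g, m = v := by
        intro m hm
        simpa using (List.all_eq_true.mp hall) m hm
      have : PySem.Set.ofList (v :: g) = [v] := by
        have := pv_ofList_run v g [] h1 (by simp)
        simpa using this
      simp [pvUniform, this, hall]
    | false =>
      obtain ⟨w, hw, hwv⟩ : ∃ w ∈ g, w ≠ v := by
        simpa using (List.all_eq_false.mp hall)
      simp only [pvUniform, hall]
      apply Bool.eq_false_iff.mpr
      intro hlen
      obtain ⟨u, hu⟩ := List.length_eq_one_iff.mp (show (PySem.Set.ofList (v :: g)).length = 1 by simpa using hlen)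
      have hv : v ∈ PySem.Set.ofList (v :: g) := (PySem.Set.mem_ofList _ _).mpr (by simp)
      have hwmem : w ∈ PySem.Set.ofList (v :: g) := (PySem.Set.mem_ofList _ _).mpr (by simp [hw])
      rw [hu] at hv hwmem
      simp at hv hwmem
      exact hwv (hwmem.trans hv.symm)

theorem pv_insertBy_filter {α : Type} (key : α → String) (c : String) (x : α) :
    ∀ acc : List α, acc.Pairwise (fun a b => key a ≤ key b) →
      (PySem.List.insertBy (fun a b => decide (key a < key b)) x acc).filter (fun y => key y == c)
        = acc.filter (fun y => key y == c) ++ (if key x == c then [x] else []) := by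
  intro acc
  induction acc with
  | nil =>
    intro _
    simp only [PySem.List.insertBy, List.filter, List.nil_append]
    by_cases hx : key x == c <;> simp [hx]
  | cons y ys ih =>
    intro h
    rw [List.pairwise_cons] at h
    obtain ⟨hy, hys⟩ := h
    simp only [PySem.List.insertBy]
    by_cases hb : decide (key x < key y) = true
    · rw [if_pos hb]
      have hxy : key x < key y := of_decide_eq_true hb
      by_cases hx : key x == c
      · have hc : key x = c := by simpa using hx
        have hnil : (y :: ys).filter (fun z => key z == c) = [] := by
          apply List.filter_eq_nil_iff.mpr
          intro z hz
          have : key y ≤ key z := by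
            rcases List.mem_cons.mp hz with rfl | hz'
            · exact le_refl _
            · exact hy z hz'
          have : c < key z := lt_of_lt_of_le (hc ▸ hxy) this
          simp [ne_of_gt this]
        simp [hx, hnil]
      · simp only [List.filter_cons, hx]
        simp
    · rw [if_neg hb]
      rw [List.filter_cons, List.filter_cons]
      rw [ih hys]
      by_cases hyc : key y == c <;> simp [hyc]

theorem pv_sorted_filter_key {α : Type} (xs : List α) (key : α → String) (c : String) :
    (PySem.List.sorted xs key).filter (fun x => key x == c) = xs.filter (fun x => key x == c) := by
  induction xs using List.reverseRecOn with
  | nil => rfl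
  | append_singleton l x ih =>
    have hstep : PySem.List.sorted (l ++ [x]) key
        = PySem.List.insertBy (fun a b => decide (key a < key b)) x (PySem.List.sorted l key) := by
      rw [PySem.List.sorted_eq_foldl_insertBy, PySem.List.sorted_eq_foldl_insertBy, List.foldl_append]
      rfl
    rw [hstep, pv_insertBy_filter key c x _ (PySem.List.sorted_pairwise l key), ih, List.filter_append]
    by_cases hx : key x == c <;> simp [hx, List.filter]

theorem pv_foldl_lex_eq {α : Type} (k1 k2 : α → String) :
    ∀ (xs acc : List α), ((acc ++ xs).map k1).Nodup →
      xs.foldl (fun a x => PySem.List.insertBy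
          (fun a b => decide (k1 a < k1 b) || (!decide (k1 b < k1 a) && decide (k2 a < k2 b))) x a) acc
        = xs.foldl (fun a x => PySem.List.insertBy (fun a b => decide (k1 a < k1 b)) x a) acc := by
  intro xs
  induction xs with
  | nil => intro acc _; rfl
  | cons x t ih =>
    intro acc hnd
    simp only [List.foldl_cons]
    have hnd' := hnd
    rw [List.map_append, List.nodup_append] at hnd'
    have hxacc : ∀ y ∈ acc, k1 x ≠ k1 y := by
      intro y hy he
      exact (hnd'.2.2 (k1 y) (List.mem_map_of_mem hy) (k1 x)
        (List.mem_map_of_mem (by simp))) he.symm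
    have hcongr : PySem.List.insertBy
        (fun a b => decide (k1 a < k1 b) || (!decide (k1 b < k1 a) && decide (k2 a < k2 b))) x acc
        = PySem.List.insertBy (fun a b => decide (k1 a < k1 b)) x acc := by
      apply pv_insertBy_congr
      intro y hy
      have hne := hxacc y hy
      by_cases hlt : k1 x < k1 y
      · simp [hlt]
      · have : k1 y < k1 x := lt_of_le_of_ne (not_lt.mp hlt) (Ne.symm hne)
        simp [hlt, this]
    rw [hcongr]
    apply ih
    have hp : (PySem.List.insertBy (fun a b => decide (k1 a < k1 b)) x acc ++ t).Perm
        (acc ++ x :: t) :=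
      ((pv_insertBy_perm _ x acc).append_right t).trans
        (by simpa using (List.perm_middle (a := x) (l₁ := acc) (l₂ := t)).symm)
    exact ((hp.map k1).nodup_iff).mpr hnd

theorem pv_sorted2_eq_sorted {α : Type} (xs : List α) (k1 : α → String) (k2 : α → String)
    (h : (xs.map k1).Nodup) :
    PySem.List.sorted2 xs k1 k2 = PySem.List.sorted xs k1 := by
  rw [PySem.List.sorted_eq_foldl_insertBy]
  have := pv_foldl_lex_eq k1 k2 xs [] (by simpa using h)
  simpa [PySem.List.sorted2] using this

theorem pv_dropWhile_head_false {α : Type} (P : α → Bool) :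
    ∀ (t : List α) (q : α) (r' : List α), t.dropWhile P = q :: r' → P q = false := by
  intro t
  induction t with
  | nil => intro q r' h; simp at h
  | cons a t ih =>
    intro q r' h
    rw [List.dropWhile_cons] at h
    by_cases ha : P a
    · rw [if_pos ha] at h
      exact ih q r' h
    · rw [if_neg ha] at h
      cases h
      exact Bool.eq_false_iff.mpr ha

theorem pvGroups_sorted : ∀ (s : List (String × String)),
    s.Pairwise (fun a b => a.1 ≤ b.1) →
    pvGroups s = pvNF (s.map (fun p => p.1)) s := by
  intro s
  induction hlen : s.length using Nat.strong_induction_on generalizing s with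
  | _ N IH =>
  cases s with
  | nil => intro _; rw [pvGroups]; rfl
  | cons p t =>
    intro hpair
    obtain ⟨n, v⟩ := p
    rw [List.pairwise_cons] at hpair
    obtain ⟨hhead, htail⟩ := hpair
    set t₁ := t.takeWhile (fun q => q.1 == n) with ht₁
    set r := t.dropWhile (fun q => q.1 == n) with hr
    have hsplit : t = t₁ ++ r := (List.takeWhile_append_dropWhile (p := fun q => q.1 == n) (l := t)).symm
    have f1 : ∀ q ∈ t₁, q.1 = n := by
      intro q hq
      have := List.mem_takeWhile_imp hq
      simpa using this
    have f2 : ∀ q ∈ r, n < q.1 := by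
      intro q hq
      cases hcr : r with
      | nil => rw [hcr] at hq; simp at hq
      | cons q0 r' =>
        have hq0ne : ¬ (q0.1 == n) = true := by
          have := pv_dropWhile_head_false (fun q => q.1 == n) t q0 r' (by rw [← hr, hcr])
          simpa using this
        have hq0mem : q0 ∈ t := by
          have : q0 ∈ r := by rw [hcr]; simp
          exact List.dropWhile_sublist _ |>.mem this
        have hq0 : n < q0.1 :=
          lt_of_le_of_ne (hhead q0 hq0mem) (by simpa using (Ne.symm (by simpa using hq0ne)))
        rw [hcr] at hq
        rcases List.mem_cons.mp hq with rfl | hq'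
        · exact hq0
        · have hrpair : r.Pairwise (fun a b => a.1 ≤ b.1) := htail.sublist (List.dropWhile_sublist _)
          rw [hcr, List.pairwise_cons] at hrpair
          exact lt_of_lt_of_le hq0 (hrpair.1 q hq')
    -- unfold one step of pvGroups
    have hscan := pvScanRun_eq n v t
    have hstep : pvGroups ((n, v) :: t)
        = (if t₁.all (fun q => q.2 == v) then [(n, v)] else []) ++ pvGroups r := by
      rw [pvGroups]
      simp only [hscan]
      rfl
    rw [hstep]
    -- sigs of n in the whole list
    have hsig_n : pvSigsOf ((n, v) :: t) n = v :: t₁.map (fun q => q.2) := by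
      unfold pvSigsOf
      rw [hsplit]
      rw [List.filter_cons]
      simp only [beq_self_eq_true, if_pos]
      rw [List.filter_append]
      have e1 : t₁.filter (fun q => q.1 == n) = t₁ :=
        List.filter_eq_self.mpr (fun q hq => by simp [f1 q hq])
      have e2 : r.filter (fun q => q.1 == n) = [] :=
        List.filter_eq_nil_iff.mpr (fun q hq => by simp [ne_of_gt (f2 q hq)])
      rw [e1, e2, List.append_nil]
      simp
    have hsig_ne : ∀ m, m ≠ n → pvSigsOf ((n, v) :: t) m = pvSigsOf r m := by
      intro m hm
      unfold pvSigsOf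
      rw [hsplit, List.filter_cons]
      have : ¬ ((n, v).1 == m) = true := by simpa using Ne.symm hm
      rw [if_neg this, List.filter_append]
      have e1 : t₁.filter (fun q => q.1 == m) = [] :=
        List.filter_eq_nil_iff.mpr (fun q hq => by simp [f1 q hq, Ne.symm hm])
      rw [e1, List.nil_append]
    -- the distinct names
    have hset : PySem.Set.ofList (((n, v) :: t).map (fun p => p.1))
        = n :: PySem.Set.ofList (r.map (fun p => p.1)) := by
      have : ((n, v) :: t).map (fun p => p.1) = n :: (t₁.map (fun p => p.1) ++ r.map (fun p => p.1)) := by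
        rw [hsplit]; simp
      rw [this]
      apply pv_ofList_run
      · intro m hm
        obtain ⟨q, hq, rfl⟩ := List.mem_map.mp hm
        exact f1 q hq
      · intro hmem
        obtain ⟨q, hq, hqn⟩ := List.mem_map.mp hmem
        exact absurd hqn (ne_of_gt (f2 q hq))
    -- IH applies to r
    have hrlen : r.length < N := by
      have h1 : r.length ≤ t.length := (List.dropWhile_sublist _).length_le
      rw [List.length_cons] at hlen
      omega
    have hrpair : r.Pairwise (fun a b => a.1 ≤ b.1) := htail.sublist (List.dropWhile_sublist _)
    have hIH := IH r.length hrlen r rfl hrpair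
    -- assemble
    unfold pvNF
    rw [hset, List.filter_cons]
    have hguard : pvUniform (pvSigsOf ((n, v) :: t) n) = t₁.all (fun q => q.2 == v) := by
      rw [hsig_n]
      simp only [pvUniform, List.all_map]
      rfl
    have htailNF :
        ((PySem.Set.ofList (r.map (fun p => p.1))).filter
            (fun m => pvUniform (pvSigsOf ((n, v) :: t) m))).map
          (fun m => (m, (pvSigsOf ((n, v) :: t) m).headD ""))
        = pvNF (r.map (fun p => p.1)) r := by
      unfold pvNF
      have hmem_ne : ∀ m ∈ PySem.Set.ofList (r.map (fun p => p.1)), m ≠ n := by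
        intro m hm
        obtain ⟨q, hq, rfl⟩ := List.mem_map.mp ((PySem.Set.mem_ofList _ _).mp hm)
        exact ne_of_gt (f2 q hq)
      rw [List.filter_congr (fun m hm => by rw [hsig_ne m (hmem_ne m hm)])]
      apply List.map_congr_left
      intro m hm
      have : m ∈ PySem.Set.ofList (r.map (fun p => p.1)) := (List.mem_filter.mp hm).1
      rw [hsig_ne m (hmem_ne m this)]
    cases hcase : t₁.all (fun q => q.2 == v) with
    | true =>
      rw [hguard, hcase]
      simp only [if_true]
      rw [List.map_cons, htailNF, hIH, hsig_n]
      simp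
    | false =>
      rw [hguard, hcase]
      simp only [Bool.false_eq_true, if_false]
      rw [htailNF, hIH]
      simp

theorem pv_pyGetD_zero (l : List String) : PySem.List.pyGetD l 0 "" = l.headD "" := by
  cases l <;> simp [PySem.List.pyGetD, PySem.List.pyGet?, PySem.List.pyIdx?]

theorem pv_A_eq (sigs : List (String × String)) :
    find_unique_signatures sigs =
      PySem.List.sorted2 (pvNF (sigs.map (fun p => p.1)) sigs) (fun p => p.1) (fun p => p.2) := by
  unfold find_unique_signatures
  have hnd : (sigs.foldl (fun d p => d.modify p.1 [] (fun l => l ++ [p.2])) PySem.Dict.empty).keys.Nodup :=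
    PySem.Dict.nodup_keys_foldl_modify_key sigs (fun p => p.1) [] (fun d p => fun l => l ++ [p.2])
      PySem.Dict.empty (by simp)
  have hkeys : (sigs.foldl (fun d p => d.modify p.1 [] (fun l => l ++ [p.2])) PySem.Dict.empty).keys
      = PySem.Set.ofList (sigs.map (fun p => p.1)) := by
    rw [PySem.Dict.keys_foldl_modify_key]
    rw [PySem.Dict.keys_empty, PySem.Set.update_nil_left]
  have hget : ∀ c, (sigs.foldl (fun d p => d.modify p.1 [] (fun l => l ++ [p.2])) PySem.Dict.empty).getD c []
      = pvSigsOf sigs c := by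
    intro c
    rw [PySem.Dict.getD_foldl_modify_append]
    simp [PySem.Dict.getD_empty, pvSigsOf]
  have hitems : (sigs.foldl (fun d p => d.modify p.1 [] (fun l => l ++ [p.2])) PySem.Dict.empty).items
      = (PySem.Set.ofList (sigs.map (fun p => p.1))).map (fun k => (k, pvSigsOf sigs k)) := by
    rw [PySem.Dict.items_eq_map_keys _ hnd [], hkeys]
    exact List.map_congr_left (fun k _ => by rw [hget k])
  simp only [hitems]
  rw [PySem.List.foldl_append_if (fun p => (PySem.Set.ofList p.2).length == 1)
      (fun p => (p.1, PySem.List.pyGetD p.2 0 ""))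
      ((PySem.Set.ofList (sigs.map (fun p => p.1))).map (fun k => (k, pvSigsOf sigs k))) []]
  rw [List.nil_append, List.filter_map, List.map_map]
  congr 1
  unfold pvNF
  rw [show ((fun p : String × List String => (PySem.Set.ofList p.2).length == 1) ∘
        (fun k => (k, pvSigsOf sigs k))) = (fun n => pvUniform (pvSigsOf sigs n)) from
      funext (fun m => by simpa using pv_guard_eq (pvSigsOf sigs m))]
  apply List.map_congr_left
  intro m _
  simp [Function.comp, pv_pyGetD_zero]

theorem pv_B_eq (sigs : List (String × String)) :
    find_unique_signatures_alt sigs =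
      pvNF ((PySem.List.sorted sigs (fun p => p.1)).map (fun p => p.1)) sigs := by
  unfold find_unique_signatures_alt
  rw [pvGroups_sorted _ (PySem.List.sorted_pairwise sigs (fun p => p.1))]
  unfold pvNF
  have hsig : ∀ m, pvSigsOf (PySem.List.sorted sigs (fun p => p.1)) m = pvSigsOf sigs m := by
    intro m
    unfold pvSigsOf
    exact congrArg (List.map (fun p => p.2)) (pv_sorted_filter_key sigs (fun p => p.1) m)
  rw [List.filter_congr (fun m _ => by rw [hsig m])]
  exact List.map_congr_left (fun m _ => by rw [hsig m])

theorem pv_final (sigs : List (String × String)) :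
    find_unique_signatures sigs = find_unique_signatures_alt sigs := by
  rw [pv_A_eq, pv_B_eq]
  unfold pvNF
  set prd := fun n => pvUniform (pvSigsOf sigs n) with hprd
  set e := fun n => (n, (pvSigsOf sigs n).headD "") with he
  set NA := (PySem.Set.ofList (sigs.map (fun p => p.1))).filter prd with hNA
  set NB := (PySem.Set.ofList ((PySem.List.sorted sigs (fun p => p.1)).map (fun p => p.1))).filter prd with hNB
  have hfste : ((fun p : String × String => p.1) ∘ e) = id := funext (fun n => rfl)
  have hNAnodup : NA.Nodup := (PySem.Set.nodup_ofList _).filter _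
  rw [pv_sorted2_eq_sorted (NA.map e) (fun p => p.1) (fun p => p.2)
      (by rw [List.map_map, hfste, List.map_id]; exact hNAnodup)]
  apply PySem.List.sorted_eq_of_perm_of_pairwise_lt
  · apply List.Perm.map
    apply List.Perm.filter
    rw [List.perm_ext_iff_of_nodup (PySem.Set.nodup_ofList _) (PySem.Set.nodup_ofList _)]
    intro m
    rw [PySem.Set.mem_ofList, PySem.Set.mem_ofList]
    exact ((PySem.List.sorted_perm sigs (fun p => p.1) false).map (fun p => p.1)).mem_iff
  · rw [List.pairwise_map]
    have h1 : ((PySem.List.sorted sigs (fun p => p.1)).map (fun p => p.1)).Pairwise (· ≤ ·) :=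
      PySem.List.sorted_map_key_pairwise sigs (fun p => p.1)
    have h2 := (pv_ofList_pairwise_lt _ h1).filter prd
    exact h2.imp (fun h => h)

-- ===== VERDICT (by name: the statement is the Claim_ definition above) =====
theorem find_unique_signatures_spec : Claim_equal_find_unique_signatures := by
  intro sigs _
  unfold Spec_find_unique_signatures
  exact pv_final sigs
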